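-- pv_equiv track=rewrite | github.com/athrael-soju/little-scripts | duckdb_fastapi/app/services/duckdb_service.py | _strip_block_comments
-- ===== SOURCE A (Python) =====
-- from typing import Any, Dict, List, Optional, Sequence, Tuple
--
-- def _strip_block_comments(sql: str) -> str:
--     """Remove /* */ comments with a linear scan to avoid regex backtracking."""
--     cleaned: List[str] = []
--     i = 0
--     length = len(sql)
--     while i < length:
--         if sql[i : i + 2] == "/*":
--             end = sql.find("*/", i + 2)
--             if end == -1:
--                 cleaned.append(sql[i:])
--                 break
--             i = end + 2
--             continue
--         cleaned.append(sql[i])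
--         i += 1
--     return "".join(cleaned)
-- ===== SOURCE B (Python) =====
-- def _strip_block_comments(sql: str) -> str:
--     """Remove /* */ comments by jumping between comment delimiters with find,
--     appending whole preserved segments instead of single characters."""
--     parts = []
--     i = 0
--     while True:
--         start = sql.find("/*", i)
--         if start == -1:
--             parts.append(sql[i:])
--             break
--         parts.append(sql[i:start])
--         end = sql.find("*/", start + 2)
--         if end == -1:
--             parts.append(sql[start:])
--             break
--         i = end + 2
--     return "".join(parts)
-- ===== Notes on version B (the rewrite author's own statement) =====
-- stated objective: faster
-- what changed: Replaces the character-by-character while-loop (slice-compare sql[i:i+2] at every position, appending one char at a time) by a find-driven segment scan that jumps straight between '/*' occurrences and appends whole preserved slices, joined at the end.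
import Mathlib
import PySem

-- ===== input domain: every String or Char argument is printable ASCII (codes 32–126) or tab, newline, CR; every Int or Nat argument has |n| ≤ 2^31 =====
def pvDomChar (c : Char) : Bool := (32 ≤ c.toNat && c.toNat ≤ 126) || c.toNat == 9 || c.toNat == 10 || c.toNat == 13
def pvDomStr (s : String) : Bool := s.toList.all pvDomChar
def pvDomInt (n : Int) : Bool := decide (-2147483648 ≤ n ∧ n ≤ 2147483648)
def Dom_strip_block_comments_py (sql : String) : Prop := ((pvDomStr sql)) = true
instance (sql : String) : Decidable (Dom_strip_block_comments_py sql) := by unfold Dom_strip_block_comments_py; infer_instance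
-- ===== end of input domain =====

-- B replaces A's char-by-char while-loop by a find-driven segment scan that jumps
-- between '/*' occurrences and appends whole preserved slices (objective: faster by
-- a constant factor in Python; a timing run measures it).
-- Both ports represent the running index i as the remaining suffix cs = sql.toList.drop i:
-- sql[i:i+2] is cs.take 2, sql.find("*/", i+2) is 2 + find of the suffix dropped by 2
-- (exact: Python's find with a start bound equals find on the dropped suffix offset back).

-- ===== PORT A =====
-- A's while-loop: check sql[i:i+2] == "/*" at every position, skip to end+2 on a
-- terminated comment, keep the whole tail on an unterminated one, else copy one char.
def stripLoopA : List Char → List Char → List Char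
  | [], acc => acc
  | c :: cs, acc =>
    if (c :: cs).take 2 = ['/', '*'] then
      let e := PySem.Chars.find ((c :: cs).drop 2) ['*', '/']
      if e = -1 then acc ++ c :: cs
      else stripLoopA ((c :: cs).drop (e.toNat + 4)) acc
    else stripLoopA cs (acc ++ [c])
  termination_by cs _ => cs.length
  decreasing_by
  · simp
  · simp

def strip_block_comments_py (sql : String) : String :=
  String.ofList (stripLoopA sql.toList [])

-- ===== PORT B =====
-- B's loop: start = find "/*"; if -1 keep the rest; else keep the slice before it,
-- end = find "*/" after it; if -1 keep from start on, else continue after end+2.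
def stripLoopB (cs : List Char) (acc : List Char) : List Char :=
  let s := PySem.Chars.find cs ['/', '*']
  if _hs : s = -1 then acc ++ cs
  else
    let e := PySem.Chars.find (cs.drop (s.toNat + 2)) ['*', '/']
    if e = -1 then acc ++ cs.take s.toNat ++ cs.drop s.toNat
    else stripLoopB (cs.drop (s.toNat + e.toNat + 4)) (acc ++ cs.take s.toNat)
  termination_by cs.length
  decreasing_by
    have hinf : ['/', '*'] <:+: cs := (PySem.Chars.find_ne_neg_one_iff cs ['/', '*']).mp _hs
    have := hinf.length_le
    simp at this ⊢
    omega

def strip_block_comments_py_alt (sql : String) : String :=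
  String.ofList (stripLoopB sql.toList [])

-- ===== PRECONDITION & SPEC =====
def Spec_strip_block_comments_py (sql : String) (out : String) : Prop := out = strip_block_comments_py_alt sql
instance (sql : String) (out : String) : Decidable (Spec_strip_block_comments_py sql out) := by unfold Spec_strip_block_comments_py; infer_instance

-- ===== CLAIM (what is proved, stated in full; the proofs are below) =====
def Claim_equal_strip_block_comments_py : Prop := ∀ (sql : String), Dom_strip_block_comments_py sql → Spec_strip_block_comments_py sql (strip_block_comments_py sql)

-- ===== LEMMAS AND PROOFS =====

-- A copies characters one by one across any region with no '/*' occurrence.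
theorem stripLoopA_march (n : Nat) :
    ∀ (cs acc : List Char), n ≤ cs.length →
      (∀ i, i < n → ¬ (['/', '*'] <+: cs.drop i)) →
      stripLoopA cs acc = stripLoopA (cs.drop n) (acc ++ cs.take n) := by
  induction n with
  | zero => intro cs acc _ _; simp
  | succ n ih =>
    intro cs acc hn hno
    match cs with
    | [] => simp at hn
    | c :: cs =>
      have h0 : ¬ (['/', '*'] <+: c :: cs) := by simpa using hno 0 (by omega)
      have hne : ¬ ((c :: cs).take 2 = ['/', '*']) := by
        intro h
        exact h0 (by rw [List.prefix_iff_eq_take]; simpa using h.symm)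
      rw [stripLoopA, if_neg hne]
      rw [ih cs (acc ++ [c]) (by simpa using hn)
        (fun i hi => by simpa using hno (i + 1) (by omega))]
      simp

theorem stripLoopA_nil (acc : List Char) : stripLoopA [] acc = acc := by rw [stripLoopA]

theorem loopA_eq_loopB :
    ∀ (n : Nat) (cs : List Char), cs.length ≤ n → ∀ acc,
      stripLoopA cs acc = stripLoopB cs acc := by
  intro n
  induction n with
  | zero =>
    intro cs hcs acc
    have : cs = [] := List.eq_nil_of_length_eq_zero (by omega)
    subst this
    rw [stripLoopB, stripLoopA]
    have : PySem.Chars.find ([] : List Char) ['/', '*'] = -1 := by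
      rw [PySem.Chars.find_eq_neg_one_iff]; simp
    simp [this]
  | succ n ih =>
    intro cs hcs acc
    rw [stripLoopB]
    by_cases hs : PySem.Chars.find cs ['/', '*'] = -1
    · -- no '/*' anywhere: A copies everything
      simp only [hs, dif_pos]
      have hninf : ¬ (['/', '*'] <:+: cs) :=
        (PySem.Chars.find_eq_neg_one_iff cs ['/', '*']).mp hs
      have hno : ∀ i, i < cs.length → ¬ (['/', '*'] <+: cs.drop i) := by
        intro i _ hpre
        exact hninf (hpre.isInfix.trans (cs.drop_suffix i).isInfix)
      rw [stripLoopA_march cs.length cs acc le_rfl hno]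
      simp [stripLoopA_nil]
    · simp only [hs, dif_neg, not_false_iff]
      set s := PySem.Chars.find cs ['/', '*'] with hsdef
      have hs0 : 0 ≤ s := lt_of_le_of_ne (PySem.Chars.neg_one_le_find cs ['/', '*']) (Ne.symm hs)
      obtain ⟨hpre, hmin⟩ := PySem.Chars.find_spec hs0
      set k := s.toNat with hkdef
      -- cs.drop k starts with '/', '*'
      obtain ⟨t, ht⟩ := hpre
      have hklen : k + 2 ≤ cs.length := by
        have := congrArg List.length ht
        simp at this
        omega
      -- march A to position k
      rw [stripLoopA_march k cs acc (by omega) (fun i hi => hmin i hi)]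
      rw [← ht]
      simp only [List.cons_append, List.nil_append]
      rw [stripLoopA]
      rw [if_pos (show ('/' :: '*' :: t).take 2 = ['/', '*'] from rfl)]
      have hdd : (['/', '*'] ++ t).drop 2 = cs.drop (k + 2) := by
        have h2 := congrArg (List.drop 2) ht
        rw [List.drop_drop] at h2
        simpa [Nat.add_comm] using h2
      simp only []
      rw [show (('/' :: '*' :: t).drop 2) = cs.drop (k + 2) from by simpa using hdd]
      by_cases he : PySem.Chars.find (cs.drop (k + 2)) ['*', '/'] = -1
      · rw [if_pos he, if_pos he]
      · rw [if_neg he, if_neg he]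
        have hdd2 : ('/' :: '*' :: t).drop ((PySem.Chars.find (cs.drop (k + 2)) ['*', '/']).toNat + 4)
            = cs.drop (k + (PySem.Chars.find (cs.drop (k + 2)) ['*', '/']).toNat + 4) := by
          have h3 := congrArg (List.drop ((PySem.Chars.find (cs.drop (k + 2)) ['*', '/']).toNat + 4)) ht
          rw [List.drop_drop] at h3
          simpa [show (PySem.Chars.find (cs.drop (k + 2)) ['*', '/']).toNat + 4 + k
              = k + (PySem.Chars.find (cs.drop (k + 2)) ['*', '/']).toNat + 4 from by omega] using h3
        rw [hdd2]
        exact ih _ (by simp; omega) _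

-- ===== VERDICT (by name: the statement is the Claim_ definition above) =====
theorem strip_block_comments_py_spec : Claim_equal_strip_block_comments_py := by
  intro sql _
  unfold Spec_strip_block_comments_py strip_block_comments_py strip_block_comments_py_alt
  rw [loopA_eq_loopB sql.toList.length sql.toList le_rfl]
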